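-- pv_equiv track=rewrite | github.com/pulkitmunjral/DSA_python | Other/max0_1.py | max01
-- ===== SOURCE A (Python) =====
-- def max01(array):
--
--     ones = []
--     rows = len(array)
--     cols = len(array[0])
--     for i in range(rows):
--         for j in range(cols):
--             if array[i][j]==1:
--                 ones.append((i,j))
--     len_ones = len(ones)
--     if len_ones == rows*cols or len_ones == 0:
--         return -1
--
--     ans = 0
--
--     for i in range(rows):
--         for j in range(cols):
--             if not array[i][j]:
--                 temp = 10**9
--
--                 for k in range(len_ones):
--                     temp = min(temp, abs(ones[k][0]-i) + abs(ones[k][1]-j))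
--
--                 ans = max(temp, ans)
--     return ans
-- ===== SOURCE B (Python) =====
-- def max01(array):
--     rows, cols = len(array), len(array[0])
--     ones = [(i, j) for i in range(rows) for j in range(cols) if array[i][j] == 1]
--     if not ones or len(ones) == rows * cols:
--         return -1
--     dist = [[10 ** 9] * cols for _ in range(rows)]
--     for (r, c) in ones:
--         dist = [[min(dist[i][j], abs(r - i) + abs(c - j)) for j in range(cols)]
--                 for i in range(rows)]
--     ans = 0
--     for i in range(rows):
--         for j in range(cols):
--             if array[i][j] == 0:
--                 ans = max(ans, dist[i][j])
--     return ans
-- ===== Notes on version B (the rewrite author's own statement) =====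
-- stated objective: alternative
-- what changed: B materialises a full distance field by relaxing every cell against each 1-cell (ones-outer traversal) and then takes one max-scan over the 0-cells, instead of A's per-0-cell inner scan over the ones list; same asymptotic cost, entirely different loop structure and maintained state.
import Mathlib
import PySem

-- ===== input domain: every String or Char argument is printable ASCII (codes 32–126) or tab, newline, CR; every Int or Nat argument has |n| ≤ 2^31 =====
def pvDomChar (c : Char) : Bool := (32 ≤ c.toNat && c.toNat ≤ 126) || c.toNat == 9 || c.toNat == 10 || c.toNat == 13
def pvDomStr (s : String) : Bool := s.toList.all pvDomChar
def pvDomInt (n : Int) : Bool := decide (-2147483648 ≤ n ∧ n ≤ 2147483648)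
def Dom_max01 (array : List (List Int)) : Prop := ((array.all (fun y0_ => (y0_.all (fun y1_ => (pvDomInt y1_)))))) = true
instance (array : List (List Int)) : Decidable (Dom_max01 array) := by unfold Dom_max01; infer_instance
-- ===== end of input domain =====

-- One honest line: B replaces A's per-0-cell inner scan of the ones list by building a
-- distance field (one relaxation pass of the whole grid per 1-cell) followed by a single
-- max-scan over the 0-cells; an alternative traversal of the same cost, not a speed claim.

-- array[i][j] (in range under Pre_max01, where Python's indexing cannot raise)
def pvCell (array : List (List Int)) (i j : Int) : Int :=
  PySem.List.pyGetD (PySem.List.pyGetD array i []) j 0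

-- ===== PORT A =====
def max01 (array : List (List Int)) : Int :=
  let rows : Int := array.length
  let cols : Int := (array.headI.length : Int)
  let ones : List (Int × Int) :=
    (PySem.List.pyRange 0 rows 1).foldl (fun acc i =>
      (PySem.List.pyRange 0 cols 1).foldl (fun acc2 j =>
        if pvCell array i j == 1 then acc2 ++ [(i, j)] else acc2) acc) []
  let lenOnes : Int := ones.length
  if lenOnes == rows * cols || lenOnes == 0 then -1
  else
    (PySem.List.pyRange 0 rows 1).foldl (fun ans i =>
      (PySem.List.pyRange 0 cols 1).foldl (fun ans2 j =>
        if pvCell array i j == 0 then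
          let temp := ones.foldl (fun t p => min t (|p.1 - i| + |p.2 - j|)) (10 ^ 9)
          max temp ans2
        else ans2) ans) 0

-- ===== PORT B =====
def pvDist (r c i j : Int) : Int := |r - i| + |c - j|

def max01_alt (array : List (List Int)) : Int :=
  let rows : Int := array.length
  let cols : Int := (array.headI.length : Int)
  let ones : List (Int × Int) :=
    (PySem.List.pyRange 0 rows 1).flatMap (fun i =>
      ((PySem.List.pyRange 0 cols 1).filter (fun j => pvCell array i j == 1)).map
        (fun j => (i, j)))
  if ones.isEmpty || (ones.length : Int) == rows * cols then -1
  else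
    let dist : List (List Int) :=
      ones.foldl (fun d p =>
        (PySem.List.pyRange 0 rows 1).map (fun i =>
          (PySem.List.pyRange 0 cols 1).map (fun j =>
            min (PySem.List.pyGetD (PySem.List.pyGetD d i []) j 0) (pvDist p.1 p.2 i j))))
        ((PySem.List.pyRange 0 rows 1).map (fun _ =>
          (PySem.List.pyRange 0 cols 1).map (fun _ => (10 ^ 9 : Int))))
    (PySem.List.pyRange 0 rows 1).foldl (fun ans i =>
      (PySem.List.pyRange 0 cols 1).foldl (fun ans2 j =>
        if pvCell array i j == 0 then
          max ans2 (PySem.List.pyGetD (PySem.List.pyGetD dist i []) j 0)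
        else ans2) ans) 0

-- ===== PRECONDITION & SPEC =====
-- Pre_ excludes exactly the inputs on which Python A raises IndexError: the empty list
-- (len(array[0])) and arrays with a row shorter than the first row (array[i][j] out of range).
def Pre_max01 (array : List (List Int)) : Prop :=
  array ≠ [] ∧ ∀ r ∈ array, array.headI.length ≤ r.length
instance (array : List (List Int)) : Decidable (Pre_max01 array) := by
  unfold Pre_max01; infer_instance
def pvWitness_max01 : List (List Int) := [[1, 0], [0, 0]]

def Spec_max01 (array : List (List Int)) (out : Int) : Prop := out = max01_alt array
instance (array : List (List Int)) (out : Int) : Decidable (Spec_max01 array out) := by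
  unfold Spec_max01; infer_instance

-- ===== CLAIM (what is proved, stated in full; the proofs are below) =====
def Claim_equal_max01 : Prop :=
  ∀ (array : List (List Int)), Dom_max01 array → Pre_max01 array → Spec_max01 array (max01 array)

-- ===== LEMMAS AND PROOFS =====

-- indexing a rectangle built as a double map over ranges
lemma pv_get_mapmap (rows cols i j : Int) (g : Int → Int → Int)
    (hi0 : 0 ≤ i) (hi : i < rows) (hj0 : 0 ≤ j) (hj : j < cols) :
    PySem.List.pyGetD (PySem.List.pyGetD
      ((PySem.List.pyRange 0 rows 1).map (fun i =>
        (PySem.List.pyRange 0 cols 1).map (fun j => g i j))) i []) j 0 = g i j := by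
  rw [PySem.List.pyGetD_map_pyRange_of_nonneg _ rows i [] hi0 hi,
      PySem.List.pyGetD_map_pyRange_of_nonneg _ cols j 0 hj0 hj]

-- the distance-field fold is the pointwise fold
lemma pv_field_fold (rows cols : Int) (os : List (Int × Int)) (g : Int → Int → Int) :
    os.foldl (fun d p =>
      (PySem.List.pyRange 0 rows 1).map (fun i =>
        (PySem.List.pyRange 0 cols 1).map (fun j =>
          min (PySem.List.pyGetD (PySem.List.pyGetD d i []) j 0) (pvDist p.1 p.2 i j))))
      ((PySem.List.pyRange 0 rows 1).map (fun i =>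
        (PySem.List.pyRange 0 cols 1).map (fun j => g i j)))
    = (PySem.List.pyRange 0 rows 1).map (fun i =>
        (PySem.List.pyRange 0 cols 1).map (fun j =>
          os.foldl (fun t p => min t (pvDist p.1 p.2 i j)) (g i j))) := by
  induction os generalizing g with
  | nil => simp
  | cons p os ih =>
    simp only [List.foldl_cons]
    have hstep :
        (PySem.List.pyRange 0 rows 1).map (fun i =>
          (PySem.List.pyRange 0 cols 1).map (fun j =>
            min (PySem.List.pyGetD (PySem.List.pyGetD
              ((PySem.List.pyRange 0 rows 1).map (fun i =>
                (PySem.List.pyRange 0 cols 1).map (fun j => g i j))) i []) j 0)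
              (pvDist p.1 p.2 i j)))
        = (PySem.List.pyRange 0 rows 1).map (fun i =>
            (PySem.List.pyRange 0 cols 1).map (fun j =>
              min (g i j) (pvDist p.1 p.2 i j))) := by
      refine List.map_congr_left (fun i hi => ?_)
      refine List.map_congr_left (fun j hj => ?_)
      rw [PySem.List.mem_pyRange_one] at hi hj
      rw [pv_get_mapmap rows cols i j g hi.1 hi.2 hj.1 hj.2]
    rw [hstep, ih]

-- ones as computed by A equals ones as computed by B
lemma pv_ones_eq (array : List (List Int)) (rows cols : Int) :
    (PySem.List.pyRange 0 rows 1).foldl (fun acc i =>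
      (PySem.List.pyRange 0 cols 1).foldl (fun acc2 j =>
        if pvCell array i j == 1 then acc2 ++ [(i, j)] else acc2) acc) []
    = (PySem.List.pyRange 0 rows 1).flatMap (fun i =>
        ((PySem.List.pyRange 0 cols 1).filter (fun j => pvCell array i j == 1)).map
          (fun j => (i, j))) := by
  have hinner : ∀ (i : Int) (acc : List (Int × Int)),
      (PySem.List.pyRange 0 cols 1).foldl (fun acc2 j =>
        if pvCell array i j == 1 then acc2 ++ [(i, j)] else acc2) acc
      = acc ++ ((PySem.List.pyRange 0 cols 1).filter
          (fun j => pvCell array i j == 1)).map (fun j => (i, j)) := by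
    intro i acc
    exact PySem.List.foldl_append_if _ _ _ _
  calc (PySem.List.pyRange 0 rows 1).foldl (fun acc i =>
        (PySem.List.pyRange 0 cols 1).foldl (fun acc2 j =>
          if pvCell array i j == 1 then acc2 ++ [(i, j)] else acc2) acc) []
      = (PySem.List.pyRange 0 rows 1).foldl (fun acc i =>
          acc ++ ((PySem.List.pyRange 0 cols 1).filter
            (fun j => pvCell array i j == 1)).map (fun j => (i, j))) [] := by
        apply PySem.List.foldl_congr_mem
        intro acc i _
        exact hinner i acc
    _ = _ := by
        rw [PySem.List.foldl_append_eq_flatMap]; simp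

-- the two -1 tests decide the same Bool
lemma pv_cond (os : List (Int × Int)) (x : Int) :
    (((os.length : Int) == x) || ((os.length : Int) == 0))
      = (os.isEmpty || ((os.length : Int) == x)) := by
  cases os with
  | nil => simp
  | cons a t =>
    simp only [List.length_cons, List.isEmpty_cons]
    have : ((t.length : Int) + 1 == 0) = false := by
      simp; omega
    push_cast
    rw [this]
    simp [Bool.or_comm]

-- ===== VERDICT (by name: the statement is the Claim_ definition above) =====
theorem max01_spec : Claim_equal_max01 := by
  intro array _ _
  show max01 array = max01_alt array
  unfold max01 max01_alt
  simp only [pv_ones_eq, pv_cond]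
  generalize (PySem.List.pyRange 0 (array.length : Int) 1).flatMap
      (fun i => ((PySem.List.pyRange 0 (array.headI.length : Int) 1).filter
        (fun j => pvCell array i j == 1)).map (fun j => (i, j))) = os
  by_cases hc : (os.isEmpty || ((os.length : Int) == (array.length : Int) * (array.headI.length : Int))) = true
  · simp only [hc, if_true]
  · simp only [hc, Bool.not_eq_true] at *
    simp only [Bool.false_eq_true, if_false]
    have hd := pv_field_fold (array.length : Int) (array.headI.length : Int) os
      (fun _ _ => (10 ^ 9 : Int))
    simp only [] at hd
    rw [hd]
    apply PySem.List.foldl_congr_mem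
    intro ans i hi
    apply PySem.List.foldl_congr_mem
    intro ans2 j hj
    rw [PySem.List.mem_pyRange_one] at hi hj
    rw [pv_get_mapmap (array.length : Int) (array.headI.length : Int) i j _
      hi.1 hi.2 hj.1 hj.2]
    by_cases h0 : (pvCell array i j == 0) = true
    · simp only [h0, if_true, pvDist, max_comm]
    · simp only [h0, Bool.not_eq_true] at *
      simp
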